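-- pv_equiv track=rewrite | github.com/LiuChenglong0105-Lonnie/LiuCLXQAIAssistant-20250827 | track_spider.py | split_blocks
-- ===== SOURCE A (Python) =====
-- def split_blocks(lines):
--     blocks = []
--     block = []
--     for line in lines:
--         if line.strip().startswith('# '):
--             if block:
--                 blocks.append(block)
--             block = [line.rstrip()]
--         else:
--             block.append(line.rstrip())
--     if block:
--         blocks.append(block)
--     return blocks
-- ===== SOURCE B (Python) =====
-- def split_blocks(lines):
--     if not lines:
--         return []
--     j = 1
--     while j < len(lines) and not lines[j].strip().startswith('# '):
--         j += 1
--     return [[ln.rstrip() for ln in lines[:j]]] + split_blocks(lines[j:])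
-- ===== Notes on version B (the rewrite author's own statement) =====
-- stated objective: alternative
-- what changed: Replaced the stateful accumulate-and-flush loop (blocks/block accumulators with an end-of-loop flush) by a recursive decomposition: each call peels off one block (the head line plus following non-header lines, rstripped) and recurses on the rest.
import Mathlib
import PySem

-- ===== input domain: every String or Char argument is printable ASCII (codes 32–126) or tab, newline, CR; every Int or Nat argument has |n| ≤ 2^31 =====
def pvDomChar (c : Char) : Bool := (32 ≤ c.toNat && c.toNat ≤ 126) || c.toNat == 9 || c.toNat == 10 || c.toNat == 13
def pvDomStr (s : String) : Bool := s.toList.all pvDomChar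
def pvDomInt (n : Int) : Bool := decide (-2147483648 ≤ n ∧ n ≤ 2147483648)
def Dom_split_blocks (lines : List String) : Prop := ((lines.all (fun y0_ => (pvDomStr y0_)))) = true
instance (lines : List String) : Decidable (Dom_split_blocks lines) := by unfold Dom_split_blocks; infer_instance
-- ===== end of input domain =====

-- B is an alternative decomposition (recursive block-peeling instead of a stateful accumulate-and-flush loop); same cost, return values proved equal.

-- ===== PORT A =====
-- the loop body of A: state = (blocks, block)
def pvStepA (s : List (List String) × List String) (line : String) : List (List String) × List String :=
  if PySem.Str.startswith (PySem.Str.strip line) "# " then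
    ((if s.2 ≠ [] then s.1 ++ [s.2] else s.1), [PySem.Str.rstrip line])
  else
    (s.1, s.2 ++ [PySem.Str.rstrip line])

def split_blocks (lines : List String) : List (List String) :=
  let s := lines.foldl pvStepA ([], [])
  if s.2 ≠ [] then s.1 ++ [s.2] else s.1

-- ===== PORT B =====
-- B: peel off the first block (head line plus following non-header lines), recurse on the rest.
def split_blocks_alt (lines : List String) : List (List String) :=
  match lines with
  | [] => []
  | x :: rest =>
    let body := rest.takeWhile (fun ln => !(PySem.Str.startswith (PySem.Str.strip ln) "# "))
    ((x :: body).map PySem.Str.rstrip) :: split_blocks_alt (rest.drop body.length)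
termination_by lines.length
decreasing_by
  simp only [List.length_drop, List.length_cons]
  omega

-- ===== PRECONDITION & SPEC =====
def Spec_split_blocks (lines : List String) (out : List (List String)) : Prop := out = split_blocks_alt lines
instance (lines : List String) (out : List (List String)) : Decidable (Spec_split_blocks lines out) := by unfold Spec_split_blocks; infer_instance

-- ===== CLAIM (what is proved, stated in full; the proofs are below) =====
def Claim_equal_split_blocks : Prop := ∀ (lines : List String), Dom_split_blocks lines → Spec_split_blocks lines (split_blocks lines)

-- ===== LEMMAS AND PROOFS =====

def pvHdr (ln : String) : Bool := PySem.Str.startswith (PySem.Str.strip ln) "# "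

def pvFinal (s : List (List String) × List String) : List (List String) :=
  if s.2 ≠ [] then s.1 ++ [s.2] else s.1


theorem pv_alt_cons (x : String) (rest : List String) :
    split_blocks_alt (x :: rest) =
      ((x :: rest.takeWhile (fun ln => !(pvHdr ln))).map PySem.Str.rstrip)
        :: split_blocks_alt (rest.drop (rest.takeWhile (fun ln => !(pvHdr ln))).length) := by
  rw [split_blocks_alt.eq_def]
  rfl

theorem pv_loop (rest : List String) :
    ∀ (blocks : List (List String)) (block : List String), block ≠ [] →
      pvFinal (rest.foldl pvStepA (blocks, block)) =
        blocks ++ ((block ++ (rest.takeWhile (fun ln => !(pvHdr ln))).map PySem.Str.rstrip)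
                    :: split_blocks_alt (rest.drop (rest.takeWhile (fun ln => !(pvHdr ln))).length)) := by
  induction rest with
  | nil =>
    intro blocks block hb
    simp [pvFinal, split_blocks_alt, hb]
  | cons r rest ih =>
    intro blocks block hb
    by_cases h : pvHdr r = true
    · have hstep : pvStepA (blocks, block) r = (blocks ++ [block], [PySem.Str.rstrip r]) := by
        simp [pvStepA, pvHdr] at h ⊢
        simp [h, hb]
      rw [List.foldl_cons, hstep, ih (blocks ++ [block]) [PySem.Str.rstrip r] (by simp)]
      have ht : List.takeWhile (fun ln => !(pvHdr ln)) (r :: rest) = [] := by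
        simp [List.takeWhile, h]
      rw [ht]
      simp only [List.map_nil, List.append_nil, List.length_nil, List.drop_zero]
      rw [pv_alt_cons]
      simp [List.append_assoc]
    · have hstep : pvStepA (blocks, block) r = (blocks, block ++ [PySem.Str.rstrip r]) := by
        simp [pvStepA, pvHdr] at h ⊢
        simp [h]
      rw [List.foldl_cons, hstep, ih blocks (block ++ [PySem.Str.rstrip r]) (by simp)]
      simp [h]

-- ===== VERDICT (by name: the statement is the Claim_ definition above) =====
theorem split_blocks_spec : Claim_equal_split_blocks := by
  intro lines _
  unfold Spec_split_blocks
  cases lines with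
  | nil => simp [split_blocks, split_blocks_alt]
  | cons x rest =>
    have hstep : pvStepA ([], []) x = ([], [PySem.Str.rstrip x]) := by
      by_cases h : PySem.Str.startswith (PySem.Str.strip x) "# " = true <;> simp [pvStepA]
    have := pv_loop rest [] [PySem.Str.rstrip x] (by simp)
    simp only [split_blocks, List.foldl_cons, hstep]
    rw [pv_alt_cons]
    show pvFinal (rest.foldl pvStepA ([], [PySem.Str.rstrip x])) = _
    rw [this]
    simp
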